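-- pv_equiv track=rewrite | github.com/rikicamme01/DialogiTECH | src/SegBert.py | token_gt_bounds
-- ===== SOURCE A (Python) =====
-- def token_gt_bounds(pred:list) -> list:
--     bounds = []
--     start = 0
--     end = 0
--     for i,e in enumerate(pred[1:]):
--         if e == 0:
--             end = i
--             bounds.append((start, end))
--             start = end + 1
--     if not bounds:
--         bounds.append((0, len(pred)))
--     return bounds
-- ===== SOURCE B (Python) =====
-- def token_gt_bounds(pred: list) -> list:
--     # Recursive decomposition: split the tail at its first zero, emit that
--     # segment, and recurse on the remainder with a shifted offset.
--     def rec(tail, start):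
--         if 0 in tail:
--             k = tail.index(0)
--             return [(start, start + k)] + rec(tail[k + 1:], start + k + 1)
--         return []
--     return rec(pred[1:], 0) or [(0, len(pred))]
-- ===== Notes on version B (the rewrite author's own statement) =====
-- stated objective: alternative
-- what changed: Replaces A's single fold threading a running `start` accumulator with a recursion that splits the tail at its first zero (via index lookup), emits that segment, and recurses on the remainder with a shifted offset.
import Mathlib
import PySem

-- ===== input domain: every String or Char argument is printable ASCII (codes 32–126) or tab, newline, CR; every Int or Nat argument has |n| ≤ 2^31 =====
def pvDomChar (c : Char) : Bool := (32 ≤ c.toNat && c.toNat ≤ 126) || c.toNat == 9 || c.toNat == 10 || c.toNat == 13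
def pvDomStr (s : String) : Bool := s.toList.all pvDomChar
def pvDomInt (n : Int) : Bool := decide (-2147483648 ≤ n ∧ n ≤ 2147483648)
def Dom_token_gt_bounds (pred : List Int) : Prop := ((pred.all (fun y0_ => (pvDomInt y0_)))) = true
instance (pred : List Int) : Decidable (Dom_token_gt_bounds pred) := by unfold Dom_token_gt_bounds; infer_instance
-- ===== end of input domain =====

-- B replaces A's single fold threading a `start` accumulator by a recursion that
-- splits the tail at its first zero and recurses on the remainder (alternative decomposition, same cost).


-- ===== PORT A =====
-- state = (bounds, start, end); for i,e in enumerate(pred[1:]): if e == 0 then end := i;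
-- bounds.append((start, end)); start := end + 1
def token_gt_bounds (pred : List Int) : List (Int × Int) :=
  let r := (PySem.List.enumerate (PySem.List.slice pred (some 1) none)).foldl
    (fun (st : List (Int × Int) × Int × Int) ie =>
      if ie.2 = 0 then (st.1 ++ [(st.2.1, ie.1)], ie.1 + 1, ie.1) else st)
    ([], 0, 0)
  if r.1 = [] then [(0, (pred.length : Int))] else r.1

-- ===== PORT B =====
-- def rec(tail, start): if 0 in tail: k = tail.index(0); return [(start, start+k)] + rec(tail[k+1:], start+k+1)
--                       return []
-- Under the `0 in tail` guard Python's tail.index(0) is List.idxOf (exact), and the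
-- nonnegative slice tail[k+1:] is List.drop (k+1) (exact for 0 ≤ k+1 ≤ len).
def segRec (tail : List Int) (start : Int) : List (Int × Int) :=
  if h : (0 : Int) ∈ tail then
    -- k = tail.index(0), inlined
    (start, start + (tail.idxOf 0 : Int)) ::
      segRec (tail.drop (tail.idxOf 0 + 1)) (start + (tail.idxOf 0 : Int) + 1)
  else []
termination_by tail.length
decreasing_by
  have : tail ≠ [] := by rintro rfl; simp at h
  have := List.length_pos_of_ne_nil this
  simp [List.length_drop]; omega

-- return rec(pred[1:], 0) or [(0, len(pred))]
def token_gt_bounds_alt (pred : List Int) : List (Int × Int) :=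
  let r := segRec (PySem.List.slice pred (some 1) none) 0
  if r = [] then [(0, (pred.length : Int))] else r

-- ===== PRECONDITION & SPEC =====
def Spec_token_gt_bounds (pred : List Int) (out : List (Int × Int)) : Prop := out = token_gt_bounds_alt pred
instance (pred : List Int) (out : List (Int × Int)) : Decidable (Spec_token_gt_bounds pred out) := by unfold Spec_token_gt_bounds; infer_instance

-- ===== CLAIM =====
def Claim_equal_token_gt_bounds : Prop := ∀ (pred : List Int), Dom_token_gt_bounds pred → Spec_token_gt_bounds pred (token_gt_bounds pred)

-- ===== LEMMAS AND PROOFS =====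

-- zero positions of `tail`, offset by `s` (proof-only characterisation both ports reduce to)
def zeroPos : List Int → Int → List Int
  | [], _ => []
  | x :: t, s => if x = 0 then s :: zeroPos t (s + 1) else zeroPos t (s + 1)

-- A's fold over the enumerated tail equals the zip of shifted zero positions with zero positions.
theorem foldA_eq_zip (l : List (Int × Int)) (acc : List (Int × Int)) (s e : Int) :
    (l.foldl
      (fun (st : List (Int × Int) × Int × Int) ie =>
        if ie.2 = 0 then (st.1 ++ [(st.2.1, ie.1)], ie.1 + 1, ie.1) else st)
      (acc, s, e)).1
    = acc ++ (s :: ((l.filterMap (fun ie => if ie.2 = 0 then some ie.1 else none)).dropLast.map (· + 1))).zip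
        (l.filterMap (fun ie => if ie.2 = 0 then some ie.1 else none)) := by
  induction l generalizing acc s e with
  | nil => simp
  | cons hd t ih =>
    by_cases h : hd.2 = 0
    · simp only [List.foldl_cons, List.filterMap_cons, h]
      rw [ih]
      rcases hz : t.filterMap (fun ie => if ie.2 = 0 then some ie.1 else none) with _ | ⟨a, zt⟩
      · simp [hz]
      · simp [hz]
    · simp only [List.foldl_cons, List.filterMap_cons, h]
      exact ih acc s e

theorem filterMap_enumerate_eq_zeroPos (tail : List Int) (s : Int) :
    (PySem.List.enumerate tail s).filterMap (fun ie => if ie.2 = 0 then some ie.1 else none)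
      = zeroPos tail s := by
  induction tail generalizing s with
  | nil => simp [PySem.List.enumerate_nil, zeroPos]
  | cons x t ih =>
    rw [PySem.List.enumerate_cons]
    by_cases h : x = 0 <;> simp [zeroPos, h, ih]

theorem zeroPos_eq_nil_of_not_mem (tail : List Int) (s : Int) (h : (0 : Int) ∉ tail) :
    zeroPos tail s = [] := by
  induction tail generalizing s with
  | nil => rfl
  | cons x t ih =>
    simp only [List.mem_cons, not_or] at h
    simp [zeroPos, Ne.symm h.1, ih _ h.2]

theorem zeroPos_split (tail : List Int) (s : Int) (h : (0 : Int) ∈ tail) :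
    zeroPos tail s = (s + (tail.idxOf 0 : Int)) ::
      zeroPos (tail.drop (tail.idxOf 0 + 1)) (s + (tail.idxOf 0 : Int) + 1) := by
  induction tail generalizing s with
  | nil => simp at h
  | cons x t ih =>
    by_cases hx : x = 0
    · subst hx; simp [zeroPos, List.idxOf_cons_self]
    · have ht : (0 : Int) ∈ t := by
        rcases List.mem_cons.mp h with h1 | h1
        · exact absurd h1.symm hx
        · exact h1
      have hidx : (x :: t).idxOf 0 = t.idxOf 0 + 1 := by
        simp [hx]
      simp only [zeroPos, if_neg hx, hidx, List.drop_succ_cons]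
      rw [ih (s + 1) ht]
      congr 1
      · push_cast; ring
      · congr 1; push_cast; ring

theorem segRec_eq_zip (tail : List Int) (s : Int) :
    segRec tail s = (s :: (zeroPos tail s).dropLast.map (· + 1)).zip (zeroPos tail s) := by
  induction hn : tail.length using Nat.strong_induction_on generalizing tail s with
  | _ n ih =>
    by_cases h : (0 : Int) ∈ tail
    · rw [segRec, dif_pos h, zeroPos_split tail s h]
      have hne : tail ≠ [] := by rintro rfl; simp at h
      have hlen : (tail.drop (tail.idxOf 0 + 1)).length < n := by
        have := List.length_pos_of_ne_nil hne
        simp [List.length_drop]; omega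
      rw [ih _ hlen _ _ rfl]
      rcases hz : zeroPos (tail.drop (tail.idxOf 0 + 1)) (s + (tail.idxOf 0 : Int) + 1) with _ | ⟨a, zt⟩
      · simp
      · simp
    · rw [segRec, dif_neg h, zeroPos_eq_nil_of_not_mem tail s h]
      simp

-- ===== VERDICT =====
theorem token_gt_bounds_spec : Claim_equal_token_gt_bounds := by
  intro pred _
  show _ = _
  unfold token_gt_bounds token_gt_bounds_alt
  simp only [foldA_eq_zip, segRec_eq_zip, filterMap_enumerate_eq_zeroPos, List.nil_append]
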